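-- pv_equiv track=rewrite | github.com/dikshax/uni | intro_pro/course_work_4/testing.py | get_remaining_letters
-- ===== SOURCE A (Python) =====
-- import string
--
-- def get_remaining_letters(letters_guessed):
--     alphabet = string.ascii_lowercase
--     alphabet = [x for x in alphabet]
--     for x in letters_guessed:
--         if x in alphabet:
--             alphabet.remove(x)
--     alphabet = ''.join(alphabet)
--     return alphabet
-- ===== SOURCE B (Python) =====
-- import string
--
-- def get_remaining_letters(letters_guessed):
--     guessed = set(letters_guessed)
--     return ''.join(c for c in string.ascii_lowercase if c not in guessed)
-- ===== Notes on version B (the rewrite author's own statement) =====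
-- stated objective: faster
-- what changed: B iterates once over the fixed 26-letter alphabet testing membership in a set built from the guesses, instead of A's loop over the guesses with an O(26) list scan and destructive list.remove per guess.
import Mathlib
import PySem

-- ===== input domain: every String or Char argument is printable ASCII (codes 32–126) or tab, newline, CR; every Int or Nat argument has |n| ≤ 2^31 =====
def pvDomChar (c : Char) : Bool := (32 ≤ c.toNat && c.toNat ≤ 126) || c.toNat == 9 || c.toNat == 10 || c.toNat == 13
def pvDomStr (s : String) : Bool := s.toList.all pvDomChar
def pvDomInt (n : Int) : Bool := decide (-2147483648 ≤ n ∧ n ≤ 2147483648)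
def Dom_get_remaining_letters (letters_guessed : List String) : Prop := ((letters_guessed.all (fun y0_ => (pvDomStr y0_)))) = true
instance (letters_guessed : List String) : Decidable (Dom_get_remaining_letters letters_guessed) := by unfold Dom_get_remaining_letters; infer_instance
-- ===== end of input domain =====

-- ===== PORT A =====
-- B filters the fixed alphabet against a set of the guesses instead of removing guesses
-- from a mutable alphabet list (idiomatic decomposition; same return value everywhere).
def get_remaining_letters (letters_guessed : List String) : String :=
  let alphabet : List String := "abcdefghijklmnopqrstuvwxyz".toList.map (fun c => String.ofList [c])
  let alphabet := letters_guessed.foldl (fun acc x => if x ∈ acc then acc.erase x else acc) alphabet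
  PySem.Str.join "" alphabet

-- ===== PORT B =====
def get_remaining_letters_alt (letters_guessed : List String) : String :=
  let guessed : PySem.Set String := PySem.Set.ofList letters_guessed
  String.ofList ("abcdefghijklmnopqrstuvwxyz".toList.filter
    (fun c => !(PySem.Set.contains guessed (String.ofList [c]))))

-- ===== PRECONDITION & SPEC =====
def Spec_get_remaining_letters (letters_guessed : List String) (out : String) : Prop := out = get_remaining_letters_alt letters_guessed
instance (letters_guessed : List String) (out : String) : Decidable (Spec_get_remaining_letters letters_guessed out) := by unfold Spec_get_remaining_letters; infer_instance

-- ===== CLAIM (what is proved, stated in full; the proofs are below) =====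
def Claim_equal_get_remaining_letters : Prop := ∀ (letters_guessed : List String), Dom_get_remaining_letters letters_guessed → Spec_get_remaining_letters letters_guessed (get_remaining_letters letters_guessed)

-- ===== LEMMAS AND PROOFS =====

-- A's loop over the guesses, on a duplicate-free state, is a filter by non-membership.
theorem foldl_erase_eq_filter (gs : List String) :
    ∀ (l : List String), l.Nodup →
      gs.foldl (fun acc x => if x ∈ acc then acc.erase x else acc) l
        = l.filter (fun s => decide (s ∉ gs)) := by
  induction gs with
  | nil => intro l _; simp
  | cons g gs ih =>
    intro l hl
    have hstep : (if g ∈ l then l.erase g else l) = l.erase g := by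
      by_cases h : g ∈ l
      · simp [h]
      · simp [h, List.erase_of_not_mem h]
    have herased : (l.erase g).Nodup := hl.erase g
    simp only [List.foldl_cons, hstep, ih _ herased]
    rw [hl.erase_eq_filter g]
    rw [List.filter_filter]
    apply List.filter_congr
    intro s _
    by_cases h1 : s = g <;> by_cases h2 : s ∈ gs <;> simp [h1, h2]

-- joining singleton strings with "" gives back the characters
theorem join_singletons (cs : List Char) :
    PySem.Str.join "" (cs.map (fun c => String.ofList [c])) = String.ofList cs := by
  apply String.ext
  simp [PySem.Str.toList_join, List.map_map, Function.comp_def,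
    PySem.Chars.join_nil_singletons]

theorem alpha_map_nodup :
    (("abcdefghijklmnopqrstuvwxyz".toList.map (fun c => String.ofList [c])) : List String).Nodup := by
  decide

-- ===== VERDICT (by name: the statement is the Claim_ definition above) =====
theorem get_remaining_letters_spec : Claim_equal_get_remaining_letters := by
  intro lg _
  unfold Spec_get_remaining_letters get_remaining_letters get_remaining_letters_alt
  simp only []
  rw [foldl_erase_eq_filter lg _ alpha_map_nodup]
  rw [List.filter_map]
  rw [join_singletons]
  congr 1
  apply List.filter_congr
  intro c _
  simp [PySem.Set.mem_ofList]
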